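-- pv_equiv track=rewrite | github.com/Rcpersico/SGN_NILM | sgnNet.py | auto_tcn_dilations
-- ===== SOURCE A (Python) =====
-- import math
--
-- def auto_tcn_dilations(win_len: int) -> tuple[int, ...]:
--     if win_len < 8:
--         return (1,)  # smallest sensible set
--     max_target = max(1, win_len // 8)        # e.g., 64→8, 256→32, 1024→128
--     # largest power of two <= max_target
--     d = 1
--     while (d << 1) <= max_target:
--         d <<= 1
--     # build (1, 2, 4, ..., d)
--     L = int(math.log2(d)) + 1
--     return tuple(1 << i for i in range(L))
-- ===== SOURCE B (Python) =====
-- def auto_tcn_dilations(win_len: int) -> tuple[int, ...]: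
--     if win_len < 8:
--         return (1,)
--     exp = (win_len // 8).bit_length() - 1
--     return tuple(1 << i for i in range(exp + 1))
-- ===== Notes on version B (the rewrite author's own statement) =====
-- stated objective: idiomatic
-- what changed: Replaces the iterative doubling search plus float log2 by a single closed-form bit_length() computation of the exponent.
import Mathlib
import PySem

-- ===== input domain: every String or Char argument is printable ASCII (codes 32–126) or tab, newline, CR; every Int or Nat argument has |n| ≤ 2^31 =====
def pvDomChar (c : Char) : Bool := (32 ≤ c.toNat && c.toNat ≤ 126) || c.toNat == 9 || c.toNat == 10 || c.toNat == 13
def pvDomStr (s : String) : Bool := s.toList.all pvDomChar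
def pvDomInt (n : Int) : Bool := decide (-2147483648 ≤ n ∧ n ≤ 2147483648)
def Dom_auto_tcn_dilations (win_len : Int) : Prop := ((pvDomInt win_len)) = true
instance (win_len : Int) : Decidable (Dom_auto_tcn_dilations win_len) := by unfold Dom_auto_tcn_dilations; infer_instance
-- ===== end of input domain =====

-- B replaces A's iterative doubling search plus float log2 by a closed-form bit_length computation (idiomatic).

-- ===== PORT A =====
-- while (d << 1) <= max_target: d <<= 1   (d stays positive, so the loop terminates)
def pvALoop (m d : Int) (hd : 0 < d) : Int :=
  if h : d * 2 ≤ m then pvALoop m (d * 2) (by omega) else d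
termination_by (m - d).toNat
decreasing_by omega

def auto_tcn_dilations (win_len : Int) : List Int :=
  if win_len < 8 then [1]
  else
    let max_target := max 1 (PySem.Int.floordiv win_len 8)
    let d := pvALoop max_target 1 (by omega)
    -- int(math.log2(d)) is exact here since d is a power of two; ported as Nat.log2
    let L := Nat.log2 d.toNat + 1
    (List.range L).map (fun i => (1 : Int) * 2 ^ i)

-- ===== PORT B =====
def auto_tcn_dilations_alt (win_len : Int) : List Int :=
  if win_len < 8 then [1]
  else
    -- (win_len // 8).bit_length() - 1 = Nat.log2 of the (positive) quotient
    let exp := Nat.log2 (PySem.Int.floordiv win_len 8).toNat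
    (List.range (exp + 1)).map (fun i => (1 : Int) * 2 ^ i)

-- ===== PRECONDITION & SPEC =====
def Spec_auto_tcn_dilations (win_len : Int) (out : List Int) : Prop := out = auto_tcn_dilations_alt win_len
instance (win_len : Int) (out : List Int) : Decidable (Spec_auto_tcn_dilations win_len out) := by unfold Spec_auto_tcn_dilations; infer_instance

-- ===== CLAIM (what is proved, stated in full; the proofs are below) =====
def Claim_equal_auto_tcn_dilations : Prop := ∀ (win_len : Int), Dom_auto_tcn_dilations win_len → Spec_auto_tcn_dilations win_len (auto_tcn_dilations win_len)

-- ===== LEMMAS AND PROOFS =====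

/-- The doubling loop, started at `d ≤ m`, returns a power-of-two multiple `a` of `d`
with `a ≤ m < 2 * a`. -/
theorem pvALoop_spec (m d : Int) (hd : 0 < d) (h : d ≤ m) :
    pvALoop m d hd ≤ m ∧ m < 2 * pvALoop m d hd ∧ ∃ k : Nat, pvALoop m d hd = d * 2 ^ k := by
  rw [pvALoop]
  by_cases hle : d * 2 ≤ m
  · rw [dif_pos hle]
    obtain ⟨h1, h2, k, hk⟩ := pvALoop_spec m (d * 2) (by omega) hle
    exact ⟨h1, h2, k + 1, by rw [hk]; ring⟩
  · rw [dif_neg hle]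
    exact ⟨h, by omega, 0, by ring⟩
termination_by (m - d).toNat
decreasing_by omega

theorem pvLog2_two_pow (k : Nat) : Nat.log2 (2 ^ k) = k := by
  rw [Nat.log2_eq_log_two]; exact Nat.log_pow (by omega) k

theorem auto_tcn_dilations_eq (win_len : Int) :
    auto_tcn_dilations win_len = auto_tcn_dilations_alt win_len := by
  unfold auto_tcn_dilations auto_tcn_dilations_alt
  by_cases hlt : win_len < 8
  · simp [hlt]
  · simp only [hlt, if_false]
    have h8 : (0 : Int) < 8 := by omega
    have hm : PySem.Int.floordiv win_len 8 = win_len / 8 :=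
      PySem.Int.floordiv_eq_ediv_of_pos h8
    set m : Int := PySem.Int.floordiv win_len 8 with hmdef
    have hm1 : 1 ≤ m := by rw [hm]; omega
    have hmax : max 1 m = m := by omega
    rw [hmax]
    obtain ⟨h1, h2, k, hk⟩ := pvALoop_spec m 1 (by omega) hm1
    simp only [one_mul] at hk
    rw [hk] at h1 h2 ⊢
    -- left exponent: log2 of the power of two the loop found
    have hcast : ((2 : Int) ^ k) = ((2 ^ k : Nat) : Int) := by push_cast; ring
    have hA : ((2 : Int) ^ k).toNat = 2 ^ k := by rw [hcast, Int.toNat_natCast]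
    rw [hA, pvLog2_two_pow]
    -- right exponent: log2 of m itself
    have hB : Nat.log2 m.toNat = k := by
      rw [Nat.log2_eq_log_two]
      apply Nat.log_eq_of_pow_le_of_lt_pow
      · have : (2 : Int) ^ k ≤ m := h1
        have := Int.toNat_le_toNat this
        simpa [hA] using this
      · have h2' : m < 2 ^ (k + 1) := by
          have : (2 : Int) ^ (k + 1) = 2 * 2 ^ k := by ring
          omega
        have hmn : (m.toNat : Int) = m := Int.toNat_of_nonneg (by omega)
        have : (m.toNat : Int) < ((2 ^ (k + 1) : Nat) : Int) := by push_cast; omega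
        exact_mod_cast this
    rw [hB]

-- ===== VERDICT (by name: the statement is the Claim_ definition above) =====
theorem auto_tcn_dilations_spec : Claim_equal_auto_tcn_dilations := by
  intro win_len _
  exact auto_tcn_dilations_eq win_len
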